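-- pv_equiv track=rewrite | github.com/ymoisan/xcube | xcube/core/chunk.py | compute_chunk_slices
-- ===== SOURCE A (Python) =====
-- import itertools
-- from typing import Dict, Tuple, Iterable, Iterator
--
-- def compute_chunk_slices(chunks: Tuple[Tuple[int, ...], ...]) -> Iterable:
--     chunk_indices = []
--     for c in chunks:
--         chunk_indices.append(tuple(i for i in range(len(c))))
--
--     chunk_slices = []
--     for c in chunks:
--         x = []
--         o = 0
--         for s in c:
--             x.append((o, o + s))
--             o += s
--         chunk_slices.append(tuple(x))
--
--     return zip(itertools.product(*chunk_indices),
--                itertools.product(*chunk_slices))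
-- ===== SOURCE B (Python) =====
-- import itertools
--
-- def compute_chunk_slices(chunks):
--     axes = []
--     for c in chunks:
--         fused = []
--         o = 0
--         for i, s in enumerate(c):
--             fused.append((i, (o, o + s)))
--             o += s
--         axes.append(fused)
--     return (
--         (tuple(p[0] for p in combo), tuple(p[1] for p in combo))
--         for combo in itertools.product(*axes)
--     )
-- ===== Notes on version B (the rewrite author's own statement) =====
-- stated objective: simpler
-- what changed: Fuses each axis's chunk index and (start,end) slice into one list built in a single pass, then takes a single itertools.product and unzips each combination, instead of two separate per-axis passes, two parallel products and a zip.
import Mathlib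
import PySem

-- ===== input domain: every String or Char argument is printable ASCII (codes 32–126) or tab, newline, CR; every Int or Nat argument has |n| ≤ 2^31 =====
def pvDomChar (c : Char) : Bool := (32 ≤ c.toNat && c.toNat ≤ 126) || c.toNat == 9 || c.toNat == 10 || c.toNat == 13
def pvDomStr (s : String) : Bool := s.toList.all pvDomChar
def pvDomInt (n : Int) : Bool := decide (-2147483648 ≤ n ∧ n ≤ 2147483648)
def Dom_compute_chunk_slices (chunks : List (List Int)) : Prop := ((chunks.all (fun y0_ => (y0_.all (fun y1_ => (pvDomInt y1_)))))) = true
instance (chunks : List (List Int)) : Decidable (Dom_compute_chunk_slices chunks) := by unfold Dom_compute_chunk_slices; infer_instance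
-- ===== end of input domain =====

-- B fuses each axis's index and slice into one list and takes a single product, then unzips;
-- same result as A's two parallel products zipped together ('simpler' decomposition, not faster).

-- itertools.product over a list of lists (first factor varies slowest) — shared helper for both ports
def pyProd {α : Type} : List (List α) → List (List α)
  | [] => [[]]
  | l :: ls => l.flatMap (fun x => (pyProd ls).map (x :: ·))

-- ===== PORT A =====
def compute_chunk_slices (chunks : List (List Int)) : List (List Int × (List (Int × Int))) :=
  -- chunk_indices: for each c, tuple(range(len(c)))
  let chunk_indices : List (List Int) :=
    chunks.foldl (fun acc c => acc ++ [PySem.List.pyRange 0 (c.length : Int) 1]) []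
  -- chunk_slices: for each c, running-offset (o, o+s) pairs
  let chunk_slices : List (List (Int × Int)) :=
    chunks.foldl (fun acc c =>
      let x := (c.foldl (fun (st : List (Int × Int) × Int) s =>
        (st.1 ++ [(st.2, st.2 + s)], st.2 + s)) ([], 0)).1
      acc ++ [x]) []
  (pyProd chunk_indices).zip (pyProd chunk_slices)

-- ===== PORT B =====
def compute_chunk_slices_alt (chunks : List (List Int)) : List (List Int × (List (Int × Int))) :=
  -- one fused list per axis: (index, (start, end)) built in a single pass
  let axes : List (List (Int × (Int × Int))) :=
    chunks.map (fun c =>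
      (c.foldl (fun (st : List (Int × (Int × Int)) × Int × Int) s =>
        (st.1 ++ [(st.2.1, (st.2.2, st.2.2 + s))], st.2.1 + 1, st.2.2 + s)) ([], 0, 0)).1)
  (pyProd axes).map (fun combo => (combo.map Prod.fst, combo.map Prod.snd))

-- ===== PRECONDITION & SPEC =====
def Spec_compute_chunk_slices (chunks : List (List Int)) (out : List (List Int × (List (Int × Int)))) : Prop := out = compute_chunk_slices_alt chunks
instance (chunks : List (List Int)) (out : List (List Int × (List (Int × Int)))) : Decidable (Spec_compute_chunk_slices chunks out) := by unfold Spec_compute_chunk_slices; infer_instance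

-- ===== CLAIM (what is proved, stated in full; the proofs are below) =====
def Claim_equal_compute_chunk_slices : Prop := ∀ (chunks : List (List Int)), Dom_compute_chunk_slices chunks → Spec_compute_chunk_slices chunks (compute_chunk_slices chunks)

-- ===== LEMMAS AND PROOFS =====

-- closed form of B's fused per-axis fold
def fse (c : List Int) (i o : Int) : List (Int × (Int × Int)) :=
  match c with
  | [] => []
  | s :: c => (i, (o, o + s)) :: fse c (i + 1) (o + s)

-- closed form of A's per-axis slice fold
def slf (c : List Int) (o : Int) : List (Int × Int) :=
  match c with
  | [] => []
  | s :: c => (o, o + s) :: slf c (o + s)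

lemma fse_fold (c : List Int) (acc : List (Int × (Int × Int))) (i o : Int) :
    c.foldl (fun (st : List (Int × (Int × Int)) × Int × Int) s =>
        (st.1 ++ [(st.2.1, (st.2.2, st.2.2 + s))], st.2.1 + 1, st.2.2 + s)) (acc, i, o)
      = (acc ++ fse c i o, i + c.length, o + c.sum) := by
  induction c generalizing acc i o with
  | nil => simp [fse]
  | cons s c ih =>
    simp only [List.foldl_cons]
    rw [ih]
    simp [fse]
    refine ⟨?_, ?_⟩
    · omega
    · ring

lemma slf_fold (c : List Int) (acc : List (Int × Int)) (o : Int) :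
    c.foldl (fun (st : List (Int × Int) × Int) s =>
        (st.1 ++ [(st.2, st.2 + s)], st.2 + s)) (acc, o)
      = (acc ++ slf c o, o + c.sum) := by
  induction c generalizing acc o with
  | nil => simp [slf]
  | cons s c ih =>
    simp only [List.foldl_cons]
    rw [ih]
    simp [slf, add_assoc]

lemma fse_map_snd (c : List Int) (i o : Int) : (fse c i o).map Prod.snd = slf c o := by
  induction c generalizing i o with
  | nil => rfl
  | cons s c ih => simp [fse, slf, ih]

lemma fse_map_fst (c : List Int) (i o : Int) :
    (fse c i o).map Prod.fst = PySem.List.pyRange i (i + (c.length : Int)) 1 := by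
  induction c generalizing i o with
  | nil => simp [fse, PySem.List.pyRange]
  | cons s c ih =>
    rw [PySem.List.pyRange_one_cons (by simp only [List.length_cons]; push_cast; omega)]
    simp only [fse, List.map_cons, ih]
    congr 2
    simp only [List.length_cons]
    push_cast
    ring

lemma pyProd_length_map {α β : Type} (f : α → β) (ps : List (List α)) :
    (pyProd (ps.map (fun l => l.map f))).length = (pyProd ps).length := by
  induction ps with
  | nil => rfl
  | cons l ps ih =>
    simp only [List.map_cons, pyProd, List.length_flatMap, List.length_map, ih, List.map_map]
    simp [Function.comp_def]


lemma zip_flatMap_cons {α β : Type} (l : List (α × β)) (A : List (List α)) (B : List (List β))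
    (P : List (List (α × β))) (hA : A.length = P.length) (hB : B.length = P.length)
    (h : A.zip B = P.map (fun c => (c.map Prod.fst, c.map Prod.snd))) :
    ((l.map Prod.fst).flatMap (fun x => A.map (x :: ·))).zip
        ((l.map Prod.snd).flatMap (fun y => B.map (y :: ·)))
      = (l.flatMap (fun p => P.map (p :: ·))).map
          (fun c => (c.map Prod.fst, c.map Prod.snd)) := by
  induction l with
  | nil => simp
  | cons p l ih =>
    simp only [List.map_cons, List.flatMap_cons]
    rw [List.zip_append (by simp [hA, hB]), ih, List.zip_map, h]
    simp [List.map_map, Function.comp]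

lemma zip_pyProd {α β : Type} (ps : List (List (α × β))) :
    (pyProd (ps.map (fun l => l.map Prod.fst))).zip (pyProd (ps.map (fun l => l.map Prod.snd)))
      = (pyProd ps).map (fun c => (c.map Prod.fst, c.map Prod.snd)) := by
  induction ps with
  | nil => rfl
  | cons l ps ih =>
    simp only [List.map_cons, pyProd]
    exact zip_flatMap_cons l _ _ _
      (pyProd_length_map Prod.fst ps) (pyProd_length_map Prod.snd ps) ih

-- ===== VERDICT (by name: the statement is the Claim_ definition above) =====
theorem compute_chunk_slices_spec : Claim_equal_compute_chunk_slices := by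
  intro chunks _
  show compute_chunk_slices chunks = compute_chunk_slices_alt chunks
  unfold compute_chunk_slices compute_chunk_slices_alt
  simp only [PySem.List.foldl_append_singleton_eq_map, List.nil_append, fse_fold, slf_fold]
  rw [← zip_pyProd]
  congr 1 <;> congr 1 <;>
    simp [List.map_map, Function.comp_def, fse_map_fst, fse_map_snd]
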